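-- pv_equiv track=rewrite | github.com/weakincentives/weakincentives | src/weakincentives/debug/environment.py | _extract_container_id_from_cgroup
-- ===== SOURCE A (Python) =====
-- _CONTAINER_ID_LENGTH = 64
--
-- def _is_valid_container_id(s: str) -> bool:
--     """Check if a string looks like a container ID (64-char hex)."""
--     return len(s) == _CONTAINER_ID_LENGTH and all(c in "0123456789abcdef" for c in s)
--
-- def _extract_container_id_from_cgroup(content: str) -> tuple[str | None, str | None]:
--     """Extract container ID and runtime from cgroup content."""
--     for line in content.splitlines():
--         if "docker" not in line and "containerd" not in line:
--             continue
--
--         runtime = "docker" if "docker" in line else "containerd"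
--         parts = line.split("/")
--         for part in reversed(parts):
--             if _is_valid_container_id(part):
--                 return part, runtime
--
--         return None, runtime
--
--     return None, None
-- ===== SOURCE B (Python) =====
-- def _extract_container_id_from_cgroup(content: str) -> tuple:
--     """Extract container ID and runtime from cgroup content."""
--     line = next((l for l in content.splitlines() if "docker" in l or "containerd" in l), None)
--     if line is None:
--         return None, None
--     runtime = "docker" if "docker" in line else "containerd"
--     best = None
--     cur = []
--     for ch in line + "/":
--         if ch == "/":
--             if len(cur) == 64 and all(c in "0123456789abcdef" for c in cur):
--                 best = "".join(cur)
--             cur = []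
--         else:
--             cur.append(ch)
--     return best, runtime
-- ===== Notes on version B (the rewrite author's own statement) =====
-- stated objective: alternative
-- what changed: Replaces the line loop with next() over a generator to pick the first docker/containerd line, and replaces the slash-split plus reversed scan with a single forward character scan over that line that keeps the last 64-char hex segment.
import Mathlib
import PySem

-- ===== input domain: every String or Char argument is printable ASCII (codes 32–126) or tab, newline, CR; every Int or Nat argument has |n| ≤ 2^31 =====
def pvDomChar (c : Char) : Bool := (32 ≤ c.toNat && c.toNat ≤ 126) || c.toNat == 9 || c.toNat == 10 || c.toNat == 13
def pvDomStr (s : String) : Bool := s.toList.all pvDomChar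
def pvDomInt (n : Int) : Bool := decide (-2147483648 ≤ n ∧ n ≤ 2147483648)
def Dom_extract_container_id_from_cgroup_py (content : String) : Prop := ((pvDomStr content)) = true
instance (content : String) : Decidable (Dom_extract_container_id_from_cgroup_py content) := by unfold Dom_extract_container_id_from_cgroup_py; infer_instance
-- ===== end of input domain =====

-- B replaces the slash-split and reversed scan by a single forward character scan keeping the last 64-hex segment (objective: alternative, same cost).

-- ===== PORT A =====
-- _is_valid_container_id: len(s) == 64 and all(c in "0123456789abcdef" for c in s)
def pvIsValidA (s : List Char) : Bool :=
  s.length == 64 && s.all (fun c => PySem.Chars.isIn [c] "0123456789abcdef".toList)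

-- inner loop: for part in reversed(parts): if valid: return part  (applied to parts.reverse)
def pvFindIdA : List (List Char) → Option (List Char)
  | [] => none
  | p :: rest => if pvIsValidA p then some p else pvFindIdA rest

-- outer loop over content.splitlines()
def pvLinesA : List (List Char) → Option String × Option String
  | [] => (none, none)
  | line :: rest =>
    if !PySem.Chars.isIn "docker".toList line && !PySem.Chars.isIn "containerd".toList line then
      pvLinesA rest
    else
      let runtime := if PySem.Chars.isIn "docker".toList line then "docker" else "containerd"
      match pvFindIdA (PySem.Chars.splitOn line ['/']).reverse with
      | some p => (some (String.ofList p), some runtime)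
      | none => (none, some runtime)

def extract_container_id_from_cgroup_py (content : String) : Option String × Option String :=
  pvLinesA (PySem.Chars.splitlines content.toList)

-- ===== PORT B =====
-- len(cur) == 64 and all(c in "0123456789abcdef" for c in cur)
def pvIsHexB (s : List Char) : Bool :=
  s.length == 64 && s.all (fun c => PySem.Chars.isIn [c] "0123456789abcdef".toList)

-- for ch in line + "/": state machine over (cur, best)
def pvScanB : List Char → List Char → Option (List Char) → Option (List Char)
  | [], _cur, best => best
  | c :: rest, cur, best =>
    if c = '/' then pvScanB rest [] (if pvIsHexB cur then some cur else best)
    else pvScanB rest (cur ++ [c]) best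

def extract_container_id_from_cgroup_py_alt (content : String) : Option String × Option String :=
  match (PySem.Chars.splitlines content.toList).find?
      (fun l => PySem.Chars.isIn "docker".toList l || PySem.Chars.isIn "containerd".toList l) with
  | none => (none, none)
  | some line =>
    let runtime := if PySem.Chars.isIn "docker".toList line then "docker" else "containerd"
    ((pvScanB (line ++ ['/']) [] none).map String.ofList, some runtime)

-- ===== PRECONDITION & SPEC =====
def Spec_extract_container_id_from_cgroup_py (content : String) (out : Option String × Option String) : Prop := out = extract_container_id_from_cgroup_py_alt content
instance (content : String) (out : Option String × Option String) : Decidable (Spec_extract_container_id_from_cgroup_py content out) := by unfold Spec_extract_container_id_from_cgroup_py; infer_instance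

-- ===== CLAIM (what is proved, stated in full; the proofs are below) =====
def Claim_equal_extract_container_id_from_cgroup_py : Prop := ∀ (content : String), Dom_extract_container_id_from_cgroup_py content → Spec_extract_container_id_from_cgroup_py content (extract_container_id_from_cgroup_py content)

-- ===== LEMMAS AND PROOFS =====

-- reference split on '/'
def pvSplitSlash : List Char → List (List Char)
  | [] => [[]]
  | c :: rest => if c = '/' then [] :: pvSplitSlash rest else (pvSplitSlash rest).modifyHead (c :: ·)

lemma pvGo_spec : ∀ (l : List Char) (fuel : Nat) (cur : List Char) (acc : List (List Char)),
    l.length ≤ fuel →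
    PySem.Chars.splitOn.go ['/'] (fuel + 1) l cur acc
      = acc.reverse ++ (pvSplitSlash l).modifyHead (fun x => cur.reverse ++ x) := by
  intro l
  induction l with
  | nil => intro fuel cur acc _; simp [PySem.Chars.splitOn.go, pvSplitSlash]
  | cons c rest ih =>
    intro fuel cur acc h
    cases fuel with
    | zero => simp at h
    | succ f =>
      by_cases hc : c = '/'
      · subst hc
        rw [show (f + 1 + 1) = (f + 1) + 1 from rfl]
        rw [PySem.Chars.splitOn.go]
        simp only [List.isPrefixOf, BEq.rfl, Bool.true_and, if_true]
        rw [show (List.drop ['/'].length ('/' :: rest)) = rest from rfl]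
        rw [ih f [] (cur.reverse :: acc) (by simpa using h)]
        simp only [pvSplitSlash, List.reverse_cons, List.reverse_nil, List.nil_append]
        cases pvSplitSlash rest <;> simp
      · rw [show (f + 1 + 1) = (f + 1) + 1 from rfl]
        rw [PySem.Chars.splitOn.go]
        have hpre : ['/'].isPrefixOf (c :: rest) = false := by
          simp [List.isPrefixOf]; exact fun h => absurd h.symm hc
        rw [hpre]
        simp only [if_false, Bool.false_eq_true]
        rw [ih f (c :: cur) acc (by simpa using h)]
        simp only [pvSplitSlash, hc, if_false, List.reverse_cons]
        cases pvSplitSlash rest <;> simp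

lemma pvSplitOn_slash (l : List Char) :
    PySem.Chars.splitOn l ['/'] = pvSplitSlash l := by
  unfold PySem.Chars.splitOn
  rw [pvGo_spec l l.length [] [] (le_refl _)]
  simp only [List.reverse_nil, List.nil_append]
  cases pvSplitSlash l <;> rfl

lemma pvFindIdA_eq_find? (parts : List (List Char)) :
    pvFindIdA parts = parts.find? pvIsValidA := by
  induction parts with
  | nil => rfl
  | cons p rest ih =>
    simp only [pvFindIdA, List.find?]
    by_cases h : pvIsValidA p <;> simp [h, ih]

lemma pvFoldl_last (parts : List (List Char)) : ∀ (b : Option (List Char)),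
    parts.foldl (fun b p => if pvIsValidA p then some p else b) b
      = (parts.reverse.find? pvIsValidA).or b := by
  induction parts with
  | nil => intro b; simp
  | cons p rest ih =>
    intro b
    simp only [List.foldl_cons, List.reverse_cons]
    rw [ih, List.find?_append]
    by_cases h : pvIsValidA p <;> simp [List.find?, h]

lemma pvScanB_spec : ∀ (cs cur : List Char) (best : Option (List Char)),
    pvScanB (cs ++ ['/']) cur best
      = ((pvSplitSlash cs).modifyHead (fun x => cur ++ x)).foldl
          (fun b p => if pvIsValidA p then some p else b) best := by
  intro cs
  have hvalid : pvIsHexB = pvIsValidA := rfl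
  induction cs with
  | nil =>
    intro cur best
    simp [pvScanB, pvSplitSlash, hvalid]
  | cons c rest ih =>
    intro cur best
    by_cases hc : c = '/'
    · subst hc
      simp only [List.cons_append, pvScanB, if_true, hvalid]
      rw [ih [] _]
      simp [pvSplitSlash]
      cases pvSplitSlash rest <;> simp
    · simp only [List.cons_append, pvScanB, hc, if_false]
      rw [ih (cur ++ [c]) best]
      simp only [pvSplitSlash, hc, if_false]
      cases pvSplitSlash rest <;> simp

lemma pvInner_eq (line : List Char) :
    pvFindIdA (PySem.Chars.splitOn line ['/']).reverse = pvScanB (line ++ ['/']) [] none := by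
  rw [pvScanB_spec line [] none, pvSplitOn_slash, pvFindIdA_eq_find?]
  have hm : (pvSplitSlash line).modifyHead (fun x => [] ++ x) = pvSplitSlash line := by
    cases pvSplitSlash line <;> simp
  rw [hm, pvFoldl_last]
  simp

lemma pvOuter_eq (lines : List (List Char)) :
    pvLinesA lines
      = match lines.find?
            (fun l => PySem.Chars.isIn "docker".toList l || PySem.Chars.isIn "containerd".toList l) with
        | none => (none, none)
        | some line =>
          let runtime := if PySem.Chars.isIn "docker".toList line then "docker" else "containerd"
          ((pvScanB (line ++ ['/']) [] none).map String.ofList, some runtime) := by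
  induction lines with
  | nil => rfl
  | cons line rest ih =>
    by_cases h : (PySem.Chars.isIn "docker".toList line || PySem.Chars.isIn "containerd".toList line) = true
    · simp only [List.find?, h]
      have h' : (!PySem.Chars.isIn "docker".toList line && !PySem.Chars.isIn "containerd".toList line) = false := by
        rw [← Bool.not_or, h]; rfl
      simp only [pvLinesA, h', Bool.false_eq_true, if_false]
      rw [← pvInner_eq line]
      cases pvFindIdA (PySem.Chars.splitOn line ['/']).reverse <;> rfl
    · have h2 := h
      rw [Bool.or_eq_true, not_or] at h2
      simp only [List.find?]
      rw [Bool.eq_false_iff.mpr h]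
      have h' : (!PySem.Chars.isIn "docker".toList line && !PySem.Chars.isIn "containerd".toList line) = true := by
        rw [← Bool.not_or, Bool.not_eq_true']; exact Bool.eq_false_iff.mpr h
      simp only [pvLinesA, h', if_true]
      exact ih

-- ===== VERDICT (by name: the statement is the Claim_ definition above) =====
theorem extract_container_id_from_cgroup_py_spec : Claim_equal_extract_container_id_from_cgroup_py := by
  intro content _
  unfold Spec_extract_container_id_from_cgroup_py
  unfold extract_container_id_from_cgroup_py extract_container_id_from_cgroup_py_alt
  rw [pvOuter_eq]
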